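-- pv_equiv track=rewrite | github.com/DuGuYifei/Notes | catalog_graph.py | folder_node_to_cluster
-- ===== SOURCE A (Python) =====
-- def folder_key(rel_posix: str, depth: int = 4) -> str:
--     parts = rel_posix.split("/")
--     if len(parts) <= 1:
--         return "ROOT"
--     dir_parts = parts[:-1][:depth]
--     return "/".join(dir_parts) if dir_parts else "ROOT"
--
-- def folder_node_to_cluster(md_rels: list[str], depth: int) -> dict[str, int]:
--     """
--     Deterministic folder clustering for md nodes:
--       cluster key = folder_key(rel, depth)
--     """
--     key_to_id: dict[str, int] = {}
--     node_to_c: dict[str, int] = {}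
--     next_id = 0
--     for rel in md_rels:
--         k = folder_key(rel, depth=depth)
--         if k not in key_to_id:
--             key_to_id[k] = next_id
--             next_id += 1
--         node_to_c[rel] = key_to_id[k]
--     return node_to_c
-- ===== SOURCE B (Python) =====
-- def folder_key(rel_posix: str, depth: int = 4) -> str:
--     parts = rel_posix.split("/")
--     if len(parts) <= 1:
--         return "ROOT"
--     dir_parts = parts[:-1][:depth]
--     return "/".join(dir_parts) if dir_parts else "ROOT"
--
-- def folder_node_to_cluster(md_rels: list[str], depth: int) -> dict[str, int]:
--     # No id table at all: the cluster id of a rel is, in closed form, the number of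
--     # DISTINCT folder keys occurring strictly before the first occurrence of its own key.
--     keys = [folder_key(rel, depth) for rel in md_rels]
--     return {rel: len(set(keys[:keys.index(k)])) for rel, k in zip(md_rels, keys)}
-- ===== Notes on version B (the rewrite author's own statement) =====
-- stated objective: alternative
-- what changed: A builds ids incrementally in one loop carrying a key->id dict and a next_id counter; B keeps no id table at all and computes each rel's id in closed form as the number of distinct keys strictly before the first occurrence of its own key (len(set(keys[:keys.index(k)]))).
import Mathlib
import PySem

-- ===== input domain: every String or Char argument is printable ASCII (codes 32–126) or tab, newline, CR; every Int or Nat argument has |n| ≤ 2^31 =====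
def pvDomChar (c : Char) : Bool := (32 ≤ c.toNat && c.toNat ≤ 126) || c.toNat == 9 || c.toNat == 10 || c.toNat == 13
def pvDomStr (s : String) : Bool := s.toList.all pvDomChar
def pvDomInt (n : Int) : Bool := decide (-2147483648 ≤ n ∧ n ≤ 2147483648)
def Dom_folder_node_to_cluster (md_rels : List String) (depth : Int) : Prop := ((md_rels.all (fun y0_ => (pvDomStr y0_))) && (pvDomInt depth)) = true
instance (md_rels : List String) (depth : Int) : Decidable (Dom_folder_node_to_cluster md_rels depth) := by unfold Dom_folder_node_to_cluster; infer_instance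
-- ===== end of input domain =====

-- B replaces A's incremental id table (dict + next_id loop) by a per-element closed form:
-- the id of a rel is the number of distinct keys strictly before the first occurrence of its key.
-- Alternative structure (quadratic instead of one pass); not claimed faster.


-- shared module helper folder_key (identical in Source A and Source B)
def folderKey (rel_posix : String) (depth : Int) : String :=
  let parts := (PySem.Str.split? rel_posix "/").getD []  -- sep "/" ≠ "": split? is always some here
  if parts.length ≤ 1 then "ROOT"
  else
    let dir_parts := PySem.List.slice (PySem.List.slice parts none (some (-1))) none (some depth)
    if dir_parts ≠ [] then PySem.Str.join "/" dir_parts else "ROOT"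

-- ===== PORT A =====
-- one loop: key_to_id grown on first sight of a key, next_id carried along, node_to_c filled in the same step
def folder_node_to_cluster (md_rels : List String) (depth : Int) : List (String × Int) :=
  let fin := md_rels.foldl
    (fun (st : PySem.Dict String Int × PySem.Dict String Int × Int) rel =>
      let kti := st.1; let ntc := st.2.1; let next := st.2.2
      let k := folderKey rel depth
      if kti.contains k = false then
        let kti' := kti.insert k next
        -- node_to_c[rel] = key_to_id[k]; k was just inserted, so get? is some (getD 0 is exact here)
        (kti', ntc.insert rel ((kti'.get? k).getD 0), next + 1)
      else
        (kti, ntc.insert rel ((kti.get? k).getD 0), next))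
    (PySem.Dict.empty, PySem.Dict.empty, 0)
  fin.2.1.items

-- ===== PORT B =====
-- keys pass; then each (rel, k): id = len(set(keys[:keys.index(k)])) — no id table
def folder_node_to_cluster_alt (md_rels : List String) (depth : Int) : List (String × Int) :=
  let keys := md_rels.map (fun rel => folderKey rel depth)
  ((md_rels.zip keys).foldl
    (fun d p =>
      -- keys.index(k): p.2 occurs in keys, so index? is some (getD 0 is exact here)
      let first : Int := ((PySem.List.index? keys p.2).map (fun n => (n : Int))).getD 0
      d.insert p.1 ((PySem.Set.ofList (PySem.List.slice keys none (some first))).length : Int))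
    PySem.Dict.empty).items

-- ===== PRECONDITION & SPEC =====
def Spec_folder_node_to_cluster (md_rels : List String) (depth : Int) (out : List (String × Int)) : Prop := out = folder_node_to_cluster_alt md_rels depth
instance (md_rels : List String) (depth : Int) (out : List (String × Int)) : Decidable (Spec_folder_node_to_cluster md_rels depth out) := by unfold Spec_folder_node_to_cluster; infer_instance

-- ===== CLAIM =====
def Claim_equal_folder_node_to_cluster : Prop := ∀ (md_rels : List String) (depth : Int), Dom_folder_node_to_cluster md_rels depth → Spec_folder_node_to_cluster md_rels depth (folder_node_to_cluster md_rels depth)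

-- ===== LEMMAS AND PROOFS =====

lemma dedup_append_singleton_mem {α : Type} [DecidableEq α] (a : List α) (k : α) (h : k ∈ PySem.List.dedup a) :
    PySem.List.dedup (a ++ [k]) = PySem.List.dedup a := by
  rw [PySem.List.dedup_eq_ofList, PySem.List.dedup_eq_ofList] at *
  rw [PySem.Set.ofList_eq_foldl, PySem.Set.ofList_eq_foldl] at *
  rw [List.foldl_append, List.foldl_cons, List.foldl_nil, PySem.Set.add_of_mem h]

lemma dedup_append_singleton_not_mem {α : Type} [DecidableEq α] (a : List α) (k : α) (h : k ∉ PySem.List.dedup a) :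
    PySem.List.dedup (a ++ [k]) = PySem.List.dedup a ++ [k] := by
  rw [PySem.List.dedup_eq_ofList, PySem.List.dedup_eq_ofList] at *
  rw [PySem.Set.ofList_eq_foldl, PySem.Set.ofList_eq_foldl] at *
  rw [List.foldl_append, List.foldl_cons, List.foldl_nil, PySem.Set.add_of_not_mem h]

lemma foldl_add_exists {α : Type} [DecidableEq α] (l : List α) :
    ∀ (s : List α), ∃ t, l.foldl PySem.Set.add s = s ++ t := by
  induction l with
  | nil => intro s; exact ⟨[], by simp⟩
  | cons x xs ih =>
    intro s
    simp only [List.foldl_cons]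
    obtain ⟨t, ht⟩ := ih (PySem.Set.add s x)
    by_cases hx : x ∈ s
    · rw [PySem.Set.add_of_mem hx] at ht ⊢; exact ⟨t, ht⟩
    · rw [PySem.Set.add_of_not_mem hx] at ht ⊢
      exact ⟨x :: t, by simpa using ht⟩

lemma dedup_append_exists {α : Type} [DecidableEq α] (a l : List α) :
    ∃ t, PySem.List.dedup (a ++ l) = PySem.List.dedup a ++ t := by
  simpa [PySem.List.dedup_eq_ofList, PySem.Set.ofList_eq_foldl] using foldl_add_exists l (List.foldl PySem.Set.add [] a)

lemma loopA (depth : Int) (rest : List String) : ∀ (ks : List String)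
    (kti ntc : PySem.Dict String Int)
    (hkti : ∀ k, kti.get? k = (PySem.List.index? (PySem.List.dedup ks) k).map (fun n => (n : Int))),
    (rest.foldl
      (fun (st : PySem.Dict String Int × PySem.Dict String Int × Int) rel =>
        let kti := st.1; let ntc := st.2.1; let next := st.2.2
        let k := folderKey rel depth
        if kti.contains k = false then
          let kti' := kti.insert k next
          (kti', ntc.insert rel ((kti'.get? k).getD 0), next + 1)
        else
          (kti, ntc.insert rel ((kti.get? k).getD 0), next))
      (kti, ntc, ((PySem.List.dedup ks).length : Int))).2.1
    = rest.foldl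
        (fun d rel => d.insert rel
          (((PySem.List.index? (PySem.List.dedup (ks ++ rest.map (fun r => folderKey r depth)))
              (folderKey rel depth)).map (fun n => (n : Int))).getD 0)) ntc := by
  induction rest with
  | nil => intro ks kti ntc hkti; simp
  | cons rel rest ih =>
    intro ks kti ntc hkti
    simp only [List.foldl_cons, List.map_cons]
    have hassoc : ks ++ folderKey rel depth :: rest.map (fun r => folderKey r depth)
        = (ks ++ [folderKey rel depth]) ++ rest.map (fun r => folderKey r depth) := by simp
    rw [hassoc]
    set k := folderKey rel depth with hk
    have hcont : kti.contains k = (PySem.List.index? (PySem.List.dedup ks) k).isSome := by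
      rw [PySem.Dict.contains_eq_isSome_get?, hkti k]
      cases PySem.List.index? (PySem.List.dedup ks) k <;> simp
    obtain ⟨t, ht⟩ := dedup_append_exists (ks ++ [k]) (rest.map (fun r => folderKey r depth))
    by_cases hmem : k ∈ PySem.List.dedup ks
    · -- key already seen: key_to_id and next_id unchanged
      have hs : kti.contains k = true := by
        rw [hcont]; exact (PySem.List.index?_isSome_iff _ _).2 hmem
      have hded : PySem.List.dedup (ks ++ [k]) = PySem.List.dedup ks := dedup_append_singleton_mem _ _ hmem
      have hval : (kti.get? k).getD 0
          = ((PySem.List.index? (PySem.List.dedup ((ks ++ [k]) ++ rest.map (fun r => folderKey r depth))) k).map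
              (fun n => (n : Int))).getD 0 := by
        rw [ht, hded, PySem.List.index?_append_of_mem t hmem, hkti k]
      have hlen : ((PySem.List.dedup ks).length : Int) = ((PySem.List.dedup (ks ++ [k])).length : Int) := by
        rw [hded]
      rw [if_neg (by simp [hs]), hval, hlen, ih (ks ++ [k]) kti _ (by rw [hded]; exact hkti)]
    · -- new key: assigned id is |dedup ks| = its index in the full dedup list
      have hs : kti.contains k = false := by
        rw [hcont, (PySem.List.index?_eq_none_iff _ _).2 hmem]
        rfl
      have hded : PySem.List.dedup (ks ++ [k]) = PySem.List.dedup ks ++ [k] :=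
        dedup_append_singleton_not_mem _ _ hmem
      have hkti' : ∀ k', (kti.insert k ((PySem.List.dedup ks).length : Int)).get? k'
          = (PySem.List.index? (PySem.List.dedup (ks ++ [k])) k').map (fun n => (n : Int)) := by
        intro k'
        rw [hded, PySem.Dict.get?_insert]
        by_cases hkk : k' = k
        · subst hkk
          rw [if_pos rfl, PySem.List.index?_append_singleton_self _ _ hmem]
          simp
        · rw [if_neg hkk]
          by_cases hm' : k' ∈ PySem.List.dedup ks
          · rw [PySem.List.index?_append_of_mem _ hm', hkti k']
          · have hn : k' ∉ PySem.List.dedup ks ++ [k] := by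
              intro h
              rcases List.mem_append.1 h with h | h
              · exact hm' h
              · exact hkk (List.mem_singleton.1 h)
            rw [(PySem.List.index?_eq_none_iff _ _).2 hn, hkti k',
                (PySem.List.index?_eq_none_iff _ _).2 hm']
      have hval : (((kti.insert k ((PySem.List.dedup ks).length : Int)).get? k).getD 0)
          = ((PySem.List.index? (PySem.List.dedup ((ks ++ [k]) ++ rest.map (fun r => folderKey r depth))) k).map
              (fun n => (n : Int))).getD 0 := by
        rw [ht, PySem.List.index?_append_of_mem t (by rw [hded]; simp),
            hded, PySem.List.index?_append_singleton_self _ _ hmem,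
            PySem.Dict.get?_insert_self]
        simp
      have hlen : ((PySem.List.dedup ks).length : Int) + 1 = ((PySem.List.dedup (ks ++ [k])).length : Int) := by
        rw [hded]; simp
      rw [if_pos (by simp [hs]), hval, hlen, ih (ks ++ [k]) _ _ hkti']

-- fold over zip xs (xs.map f) = fold over xs
lemma foldl_zip_map {α β γ : Type} (xs : List α) (f : α → β) (g : γ → α × β → γ) :
    ∀ (init : γ), (xs.zip (xs.map f)).foldl g init = xs.foldl (fun c x => g c (x, f x)) init := by
  induction xs with
  | nil => intro init; rfl
  | cons x xs ih => intro init; simp only [List.map_cons, List.zip_cons_cons, List.foldl_cons, ih]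

-- the prefix up to the first occurrence of k is the longest k-free prefix
lemma take_index_eq_takeWhile (k : String) (L : List String) : ∀ n, PySem.List.index? L k = some n →
    L.take n = L.takeWhile (fun x => x != k) := by
  induction L with
  | nil => intro n h; rw [(PySem.List.index?_eq_none_iff _ _).2 (by simp)] at h; cases h
  | cons x xs ih =>
    intro n h
    by_cases hx : x = k
    · subst hx
      rw [PySem.List.index?_cons_self] at h
      cases h
      simp [List.takeWhile_cons]
    · rw [PySem.List.index?_cons_of_ne _ hx] at h
      obtain ⟨m, hm, rfl⟩ := Option.map_eq_some_iff.1 h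
      simp only [List.take_succ_cons, List.takeWhile_cons, bne_iff_ne, ne_eq, hx,
        not_false_eq_true, decide_true, if_true]
      rw [ih m hm]

lemma idx_foldl_add (k : String) (L : List String) : ∀ (s : List String), k ∈ L → k ∉ s →
    PySem.List.index? (L.foldl PySem.Set.add s) k
      = some ((L.takeWhile (fun x => x != k)).foldl PySem.Set.add s).length := by
  induction L with
  | nil => intro s h _; cases h
  | cons x xs ih =>
    intro s hmem hns
    by_cases hx : x = k
    · subst hx
      have htw : List.takeWhile (fun y => y != x) (x :: xs) = [] := by
        simp
      rw [htw, List.foldl_nil, List.foldl_cons, PySem.Set.add_of_not_mem hns]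
      obtain ⟨t, ht⟩ := foldl_add_exists xs (s ++ [x])
      rw [ht, PySem.List.index?_append_of_mem t (by simp : x ∈ s ++ [x]),
          PySem.List.index?_append_singleton_self _ _ hns]
    · have hk : k ∈ xs := by
        rcases List.mem_cons.1 hmem with h | h
        · exact absurd h.symm hx
        · exact h
      have hns' : k ∉ PySem.Set.add s x := by
        by_cases hxs : x ∈ s
        · rw [PySem.Set.add_of_mem hxs]; exact hns
        · rw [PySem.Set.add_of_not_mem hxs]
          intro h
          rcases List.mem_append.1 h with h | h
          · exact hns h
          · exact hx (List.mem_singleton.1 h).symm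
      simp only [List.foldl_cons, List.takeWhile_cons, bne_iff_ne, ne_eq, hx, not_false_eq_true,
        if_true]
      exact ih (PySem.Set.add s x) hk hns'

-- position of k in dedup L = number of distinct elements before k's first occurrence
lemma idx_dedup (L : List String) (k : String) (h : k ∈ L) :
    PySem.List.index? (PySem.List.dedup L) k
      = some (PySem.Set.ofList (L.takeWhile (fun x => x != k))).length := by
  rw [PySem.List.dedup_eq_ofList, PySem.Set.ofList_eq_foldl, PySem.Set.ofList_eq_foldl]
  exact idx_foldl_add k L [] h (by simp)

-- ===== VERDICT (by name: the statement is the Claim_ definition above) =====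
theorem folder_node_to_cluster_spec : Claim_equal_folder_node_to_cluster := by
  intro md_rels depth _
  unfold Spec_folder_node_to_cluster folder_node_to_cluster folder_node_to_cluster_alt
  have hA := loopA depth md_rels [] PySem.Dict.empty PySem.Dict.empty
    (by intro k; rw [PySem.Dict.get?_empty]
        rw [(PySem.List.index?_eq_none_iff _ _).2 (by simp)]
        rfl)
  simp only [List.nil_append] at hA
  have h0 : ((PySem.List.dedup ([] : List String)).length : Int) = 0 := by decide
  rw [h0] at hA
  simp only [hA, foldl_zip_map]
  congr 1
  apply PySem.List.foldl_congr_mem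
  intro acc r hr
  set keys := md_rels.map (fun rel => folderKey rel depth) with hkeys
  have hkmem : folderKey r depth ∈ keys := by
    rw [hkeys]; exact List.mem_map.2 ⟨r, hr, rfl⟩
  obtain ⟨n, hn⟩ := Option.isSome_iff_exists.1 ((PySem.List.index?_isSome_iff _ _).2 hkmem)
  rw [hn, idx_dedup keys _ hkmem]
  simp only [Option.bind_eq_bind, Option.bind_some, Option.pure_def, Option.map_some,
    Option.getD_some]
  rw [PySem.List.slice_to_natCast, take_index_eq_takeWhile _ _ n hn]
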